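-- pv_equiv track=rewrite | github.com/Mizan3050/DSA-PY | Arrays/longest-word.py | easy_longest_word
-- ===== SOURCE A (Python) =====
-- def easy_longest_word(character):
--     count = 0
--     maximum = 0
--     word = ''
--
--     for c in character:
--         if c.isalnum():
--             count +=1
--             word +=c
--         else:
--             maximum =  max(maximum, count)
--             count = 0
--             word = ''
--
--     maximum = max(maximum, count)
--     return maximum, word
-- ===== SOURCE B (Python) =====
-- from itertools import groupby
--
-- def easy_longest_word(character):
--     maximum = 0
--     word = ''
--     for is_alnum, group in groupby(character, key=lambda c: c.isalnum()):
--         s = ''.join(group)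
--         if is_alnum:
--             maximum = max(maximum, len(s))
--             word = s
--         else:
--             word = ''
--     return maximum, word
-- ===== Notes on version B (the rewrite author's own statement) =====
-- stated objective: idiomatic
-- what changed: Replaces the per-character state machine (count/maximum/word mutated char by char) with itertools.groupby splitting the string into maximal alnum/non-alnum runs, taking the max run length and the trailing run in one pass over the runs.
import Mathlib
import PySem

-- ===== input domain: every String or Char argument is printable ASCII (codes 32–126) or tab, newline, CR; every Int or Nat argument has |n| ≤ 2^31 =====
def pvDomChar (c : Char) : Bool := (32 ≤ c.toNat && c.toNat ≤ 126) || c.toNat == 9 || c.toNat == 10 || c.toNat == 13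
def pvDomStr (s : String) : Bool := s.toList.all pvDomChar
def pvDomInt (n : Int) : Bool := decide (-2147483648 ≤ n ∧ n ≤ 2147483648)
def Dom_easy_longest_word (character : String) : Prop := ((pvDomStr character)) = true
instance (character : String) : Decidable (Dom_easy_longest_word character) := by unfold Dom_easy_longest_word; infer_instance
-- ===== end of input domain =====

-- B replaces A's per-character count/maximum/word state machine by a split into maximal
-- alnum/non-alnum runs (itertools.groupby) folded once; same task, more idiomatic, same cost.


-- ===== PORT A =====
-- state (count, maximum, word); word kept as List Char, turned into a String on return
def pvStepA (st : Int × Int × List Char) (c : Char) : Int × Int × List Char :=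
  if PySem.Chars.isalnum c then (st.1 + 1, st.2.1, st.2.2 ++ [c])
  else (0, max st.2.1 st.1, [])

def easy_longest_word (character : String) : Int × String :=
  let st := character.toList.foldl pvStepA (0, 0, [])
  (max st.2.1 st.1, String.ofList st.2.2)

-- ===== PORT B =====
-- itertools.groupby(character, key=isalnum): the list of (key, maximal run)
def pvGroups : List Char → List (Bool × List Char)
  | [] => []
  | c :: cs =>
    (PySem.Chars.isalnum c,
      c :: cs.takeWhile (fun d => PySem.Chars.isalnum d == PySem.Chars.isalnum c)) ::
      pvGroups (cs.dropWhile (fun d => PySem.Chars.isalnum d == PySem.Chars.isalnum c))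
termination_by l => l.length
decreasing_by
  simpa using Nat.lt_succ_of_le (List.length_dropWhile_le _ _)

-- the loop body: on an alnum run take max length and remember the word, otherwise clear it
def pvStepB (st : Int × String) (g : Bool × List Char) : Int × String :=
  if g.1 then (max st.1 (g.2.length : Int), String.ofList g.2) else (st.1, "")

def easy_longest_word_alt (character : String) : Int × String :=
  (pvGroups character.toList).foldl pvStepB (0, "")

-- ===== PRECONDITION & SPEC =====
def Spec_easy_longest_word (character : String) (out : Int × String) : Prop := out = easy_longest_word_alt character
instance (character : String) (out : Int × String) : Decidable (Spec_easy_longest_word character out) := by unfold Spec_easy_longest_word; infer_instance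

-- ===== CLAIM (what is proved, stated in full; the proofs are below) =====
def Claim_equal_easy_longest_word : Prop := ∀ (character : String), Dom_easy_longest_word character → Spec_easy_longest_word character (easy_longest_word character)

-- ===== LEMMAS AND PROOFS =====

-- the head of a dropWhile tail fails the predicate
theorem pv_dropWhile_head {α : Type} (P : α → Bool) (cs : List α) (d : α) (ds : List α)
    (h : cs.dropWhile P = d :: ds) : P d = false := by
  induction cs with
  | nil => simp at h
  | cons e es ih =>
    by_cases he : P e = true
    · exact ih (by rwa [List.dropWhile_cons_of_pos he] at h)
    · rw [List.dropWhile_cons_of_neg he] at h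
      cases h
      simpa using he

-- an all-alnum run just extends count and word
theorem pv_foldA_good (run : List Char) (h : ∀ c ∈ run, PySem.Chars.isalnum c = true) :
    ∀ (cnt m : Int) (w : List Char),
      run.foldl pvStepA (cnt, m, w) = (cnt + run.length, m, w ++ run) := by
  induction run with
  | nil => simp
  | cons c rs ih =>
    intro cnt m w
    have hc : PySem.Chars.isalnum c = true := h c (by simp)
    rw [List.foldl_cons,
      show pvStepA (cnt, m, w) c = (cnt + 1, m, w ++ [c]) from by simp [pvStepA, hc],
      ih (fun d hd => h d (by simp [hd]))]
    simp only [Prod.mk.injEq, List.length_cons, List.append_assoc, List.singleton_append,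
      and_true]
    push_cast
    ring

-- an all-non-alnum run starting from a flushed state keeps it (needs 0 ≤ m)
theorem pv_foldA_bad0 (run : List Char) (h : ∀ c ∈ run, PySem.Chars.isalnum c = false) :
    ∀ (m : Int), 0 ≤ m → run.foldl pvStepA (0, m, []) = (0, m, []) := by
  induction run with
  | nil => simp
  | cons c rs ih =>
    intro m hm
    have hc : PySem.Chars.isalnum c = false := h c (by simp)
    rw [List.foldl_cons,
      show pvStepA (0, m, []) c = (0, m, []) from by
        simp [pvStepA, hc, max_eq_left hm]]
    exact ih (fun d hd => h d (by simp [hd])) m hm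

-- the B fold ignores the incoming word once at least one group remains
theorem pv_foldB_word_irrel (gs : List (Bool × List Char)) (hne : gs ≠ [])
    (m : Int) (w1 w2 : String) :
    gs.foldl pvStepB (m, w1) = gs.foldl pvStepB (m, w2) := by
  cases gs with
  | nil => exact absurd rfl hne
  | cons g gs' =>
    simp only [List.foldl_cons, pvStepB]

-- main invariant: A's scan from a flushed state equals B's fold over the groups
theorem pv_main (l : List Char) :
    ∀ (m : Int), 0 ≤ m →
      (max (l.foldl pvStepA (0, m, [])).2.1 (l.foldl pvStepA (0, m, [])).1,
        String.ofList (l.foldl pvStepA (0, m, [])).2.2)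
      = (pvGroups l).foldl pvStepB (m, "") := by
  induction l using pvGroups.induct with
  | case1 =>
    intro m hm
    rw [pvGroups]
    simp only [List.foldl_nil]
    exact Prod.ext (by simp; omega) rfl
  | case2 c cs ih =>
    intro m hm
    rw [pvGroups]
    cases hk : PySem.Chars.isalnum c with
    | false =>
      simp only [hk] at ih ⊢
      have hrun : ∀ d ∈ cs.takeWhile (fun d => PySem.Chars.isalnum d == false),
          PySem.Chars.isalnum d = false := fun d hd => by
        simpa using List.mem_takeWhile_imp hd
      have key : (c :: cs).foldl pvStepA (0, m, []) =
          (cs.dropWhile (fun d => PySem.Chars.isalnum d == false)).foldl pvStepA (0, m, []) := by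
        conv_lhs => rw [← List.takeWhile_append_dropWhile
          (p := fun d => PySem.Chars.isalnum d == false) (l := cs)]
        rw [List.foldl_cons,
          show pvStepA (0, m, []) c = (0, m, []) from by simp [pvStepA, hk, max_eq_left hm],
          List.foldl_append, pv_foldA_bad0 _ hrun m hm]
      rw [key, List.foldl_cons,
        show pvStepB (m, "") (false, _) = (m, "") from by simp [pvStepB]]
      exact ih m hm
    | true =>
      simp only [hk] at ih ⊢
      have hrun : ∀ d ∈ cs.takeWhile (fun d => PySem.Chars.isalnum d == true),
          PySem.Chars.isalnum d = true := fun d hd => by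
        simpa using List.mem_takeWhile_imp hd
      have key : (c :: cs).foldl pvStepA (0, m, []) =
          (cs.dropWhile (fun d => PySem.Chars.isalnum d == true)).foldl pvStepA
            (1 + ((cs.takeWhile (fun d => PySem.Chars.isalnum d == true)).length : Int), m,
              c :: cs.takeWhile (fun d => PySem.Chars.isalnum d == true)) := by
        conv_lhs => rw [← List.takeWhile_append_dropWhile
          (p := fun d => PySem.Chars.isalnum d == true) (l := cs)]
        rw [List.foldl_cons,
          show pvStepA (0, m, []) c = (1, m, [c]) from by simp [pvStepA, hk],
          List.foldl_append, pv_foldA_good _ hrun]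
        rfl
      rw [key]
      cases hr : cs.dropWhile (fun d => PySem.Chars.isalnum d == true) with
      | nil =>
        simp only [List.foldl_nil, List.foldl_cons, pvStepB, pvGroups, if_pos]
        refine Prod.ext ?_ rfl
        simp only [List.length_cons]
        push_cast
        omega
      | cons d ds =>
        have hd : PySem.Chars.isalnum d = false := by
          simpa using pv_dropWhile_head _ cs d ds hr
        set run := cs.takeWhile (fun d => PySem.Chars.isalnum d == true) with hrdef
        set m' : Int := max m (1 + (run.length : Int)) with hm'def
        have hm' : 0 ≤ m' := le_trans hm (le_max_left _ _)
        have hstep1 : pvStepA (1 + (run.length : Int), m, c :: run) d = (0, m', []) := by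
          simp [pvStepA, hd, hm'def]
        have hstep2 : pvStepA (0, m', []) d = (0, m', []) := by
          simp [pvStepA, hd]; omega
        have lhs_eq : ((d :: ds).foldl pvStepA (1 + (run.length : Int), m, c :: run)) =
            ((d :: ds).foldl pvStepA (0, m', [])) := by
          rw [List.foldl_cons, List.foldl_cons, hstep1, hstep2]
        rw [lhs_eq, ← hr]
        rw [List.foldl_cons,
          show pvStepB (m, "") (true, c :: run) =
            (max m (((c :: run).length : Int)), String.ofList (c :: run)) from by simp [pvStepB]]
        have hlen : max m (((c :: run).length : Int)) = m' := by
          simp only [List.length_cons, hm'def]; push_cast; omega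
        rw [hlen]
        have hne : pvGroups (cs.dropWhile (fun d => PySem.Chars.isalnum d == true)) ≠ [] := by
          rw [hr, pvGroups]; exact List.cons_ne_nil _ _
        rw [pv_foldB_word_irrel _ hne m' (String.ofList (c :: run)) ""]
        exact ih m' hm'

-- ===== VERDICT (by name: the statement is the Claim_ definition above) =====
theorem easy_longest_word_spec : Claim_equal_easy_longest_word := by
  intro character _
  unfold Spec_easy_longest_word easy_longest_word easy_longest_word_alt
  exact pv_main character.toList 0 le_rfl
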